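-- pv_equiv track=rewrite | github.com/aleksaa01/codefights | Challenges/replaceDigitWithPrime.py | replaceDigitWithPrime
-- ===== SOURCE A (Python) =====
-- def replaceDigitWithPrime(n):
--     if n == 0:
--         return 2
--
--     primes = [1, 2, 3, 5, 7, 11, 13, 17, 19, 23, 29]
--     res = 0
--     mul = 1
--     while n > 0:
--         res += primes[n % 10 + 1] * mul
--         n //= 10
--         mul *= 10
--     return res
-- ===== SOURCE B (Python) =====
-- PRIMES = [2, 3, 5, 7, 11, 13, 17, 19, 23, 29]
--
-- def replaceDigitWithPrime(n):
--     res = 0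
--     for c in str(n):
--         res = res * 10 + PRIMES[int(c)]
--     return res
-- ===== Notes on version B (the rewrite author's own statement) =====
-- stated objective: alternative
-- what changed: Replaced A's LSB-first modular while-loop with an explicit power-of-ten multiplier and an offset-by-one prime table by converting the number to its decimal string and folding it MSB-first with Horner accumulation over a prime table indexed directly by digit.
-- outside the precondition, e.g. on replaceDigitWithPrime(-5): A returns 0, B raises ValueError
import Mathlib
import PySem

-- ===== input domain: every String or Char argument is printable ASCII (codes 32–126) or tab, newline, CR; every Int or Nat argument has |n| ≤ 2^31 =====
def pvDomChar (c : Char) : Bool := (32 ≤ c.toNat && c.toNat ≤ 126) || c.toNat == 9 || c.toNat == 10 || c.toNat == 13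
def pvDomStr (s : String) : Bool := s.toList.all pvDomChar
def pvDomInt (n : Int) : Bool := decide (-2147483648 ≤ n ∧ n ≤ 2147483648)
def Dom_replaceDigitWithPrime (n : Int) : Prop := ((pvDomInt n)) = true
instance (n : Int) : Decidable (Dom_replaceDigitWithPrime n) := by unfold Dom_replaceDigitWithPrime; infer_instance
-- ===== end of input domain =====

-- B replaces A's LSB-first modular while-loop (explicit power-of-ten multiplier,
-- offset-by-one prime table) with a string conversion of n folded MSB-first by
-- Horner accumulation over a table indexed directly by digit.

-- termination helper cited by port A's loop
theorem pvDiv10_toNat_lt {n : Int} (h : 0 < n) : (PySem.Int.floordiv n 10).toNat < n.toNat := by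
  have h1 : PySem.Int.floordiv n 10 = ((n.toNat / 10 : Nat) : Int) := by
    have h2 := PySem.Int.floordiv_natCast n.toNat 10
    have hn : ((n.toNat : Nat) : Int) = n := by omega
    rw [hn] at h2
    exact_mod_cast h2
  have h3 := Nat.div_lt_self (by omega : 0 < n.toNat) (by omega : 1 < 10)
  omega

-- ===== PORT A =====
def pvPrimesA : List Int := [1, 2, 3, 5, 7, 11, 13, 17, 19, 23, 29]

def pvLoopA (n res mul : Int) : Int :=
  if n > 0 then
    pvLoopA (PySem.Int.floordiv n 10)
            (res + PySem.List.pyGetD pvPrimesA (PySem.Int.mod n 10 + 1) 0 * mul)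
            (mul * 10)
  else res
termination_by n.toNat
decreasing_by exact pvDiv10_toNat_lt (by omega)

def replaceDigitWithPrime (n : Int) : Int :=
  if n == 0 then 2 else pvLoopA n 0 1

-- ===== PORT B =====
def pvPrimesB : List Int := [2, 3, 5, 7, 11, 13, 17, 19, 23, 29]

-- int(c) is PySem.Int.ofChars? [c]; it is some-valued on every character B meets
-- under Pre_ (decimal digits only), so the total getD 0 rendering is exact there.
def pvDigitStep (res : Int) (c : Char) : Int :=
  res * 10 + PySem.List.pyGetD pvPrimesB ((PySem.Int.ofChars? [c]).getD 0) 0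

def replaceDigitWithPrime_alt (n : Int) : Int :=
  (PySem.Int.toChars n).foldl pvDigitStep 0

-- ===== PRECONDITION & SPEC =====
-- Pre_ excludes negative n, on which A's while-loop body never runs and it falls
-- through with the empty accumulator, while B's per-character int() parse hits the
-- minus sign and raises ValueError.
def Pre_replaceDigitWithPrime (n : Int) : Prop := 0 ≤ n
instance (n : Int) : Decidable (Pre_replaceDigitWithPrime n) := by unfold Pre_replaceDigitWithPrime; infer_instance

def pvWitness_replaceDigitWithPrime : Int := (907)

def Spec_replaceDigitWithPrime (n : Int) (out : Int) : Prop := out = replaceDigitWithPrime_alt n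
instance (n : Int) (out : Int) : Decidable (Spec_replaceDigitWithPrime n out) := by unfold Spec_replaceDigitWithPrime; infer_instance

-- ===== CLAIM (what is proved, stated in full; the proofs are below) =====
def Claim_equal_replaceDigitWithPrime : Prop := ∀ (n : Int), Dom_replaceDigitWithPrime n → Pre_replaceDigitWithPrime n → Spec_replaceDigitWithPrime n (replaceDigitWithPrime n)

-- ===== LEMMAS AND PROOFS =====

-- MSB-first Horner reference value both ports are reduced to
def pvHorner (acc : Int) (m : Nat) : Int :=
  if m < 10 then acc * 10 + PySem.List.pyGetD pvPrimesB (m : Int) 0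
  else pvHorner acc (m / 10) * 10 + PySem.List.pyGetD pvPrimesB ((m % 10 : Nat) : Int) 0
termination_by m
decreasing_by exact Nat.div_lt_self (by omega) (by omega)

-- the two prime tables agree, at offset one, on every digit 0..9
theorem pvTables_agree (d : Int) (h0 : 0 ≤ d) (h9 : d < 10) :
    PySem.List.pyGetD pvPrimesA (d + 1) 0 = PySem.List.pyGetD pvPrimesB d 0 := by
  interval_cases d <;> decide

-- parsing the digit character of d < 10 recovers d
theorem pvDigitChar_parse (d : Nat) (h : d < 10) :
    (PySem.Int.ofChars? [Nat.digitChar d]).getD 0 = (d : Int) := by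
  interval_cases d <;> decide

-- Nat.toDigitsCore with sufficient fuel prepends the digit string
theorem pvToDigitsCore_append : ∀ (m fuel : Nat) (ds : List Char), m < fuel →
    Nat.toDigitsCore 10 fuel m ds = Nat.toDigits 10 m ++ ds := by
  intro m
  induction m using Nat.strong_induction_on with
  | _ m ih =>
    intro fuel ds hf
    obtain ⟨f, rfl⟩ : ∃ f, fuel = f + 1 := ⟨fuel - 1, by omega⟩
    by_cases h10 : m / 10 = 0
    · simp [Nat.toDigits, Nat.toDigitsCore, h10]
    · have hlt : m / 10 < m := Nat.div_lt_self (by omega) (by omega)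
      simp only [Nat.toDigits, Nat.toDigitsCore, h10, ite_false]
      rw [ih (m / 10) hlt f _ (by omega), ih (m / 10) hlt m _ hlt]
      simp

-- structure of the decimal string: small and step cases
theorem pvToDigits_small (m : Nat) (h : m < 10) :
    Nat.toDigits 10 m = [Nat.digitChar m] := by
  have h10 : m / 10 = 0 := Nat.div_eq_of_lt h
  have hm : m % 10 = m := Nat.mod_eq_of_lt h
  simp only [Nat.toDigits, Nat.toDigitsCore, h10, hm, if_pos]

theorem pvToDigits_step (m : Nat) (h : 10 ≤ m) :
    Nat.toDigits 10 m = Nat.toDigits 10 (m / 10) ++ [Nat.digitChar (m % 10)] := by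
  have h10 : ¬ m / 10 = 0 := by
    have := Nat.div_le_div_right (c := 10) h
    simp at this; omega
  have hlt : m / 10 < m := Nat.div_lt_self (by omega) (by omega)
  conv_lhs => rw [Nat.toDigits]
  rw [show m + 1 = m + 1 from rfl]
  simp only [Nat.toDigitsCore, h10, ite_false]
  exact pvToDigitsCore_append (m / 10) m [(m % 10).digitChar] hlt

-- B's fold over the digit string is the Horner value
theorem pvFoldB_eq_horner : ∀ (m : Nat) (acc : Int),
    (Nat.toDigits 10 m).foldl pvDigitStep acc = pvHorner acc m := by
  intro m
  induction m using Nat.strong_induction_on with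
  | _ m ih =>
    intro acc
    by_cases h : m < 10
    · rw [pvToDigits_small m h, pvHorner, if_pos h]
      simp [pvDigitStep, pvDigitChar_parse m h]
    · have hlt : m / 10 < m := Nat.div_lt_self (by omega) (by omega)
      rw [pvToDigits_step m (by omega), List.foldl_append, ih (m / 10) hlt acc]
      conv_rhs => rw [pvHorner, if_neg h]
      simp [pvDigitStep, pvDigitChar_parse (m % 10) (Nat.mod_lt m (by omega))]

-- A's loop computes res + mul * (Horner value), for every positive n
theorem pvLoopA_eq_horner : ∀ (k : Nat) (n res mul : Int), 0 < n → n.toNat ≤ k →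
    pvLoopA n res mul = res + mul * pvHorner 0 n.toNat := by
  intro k
  induction k with
  | zero => intro n res mul hn hk; omega
  | succ k ih =>
    intro n res mul hn hk
    have hfd : PySem.Int.floordiv n 10 = ((n.toNat / 10 : Nat) : Int) := by
      have h2 := PySem.Int.floordiv_natCast n.toNat 10
      have hcast : ((n.toNat : Nat) : Int) = n := by omega
      rw [hcast] at h2; exact_mod_cast h2
    have hmd : PySem.Int.mod n 10 = ((n.toNat % 10 : Nat) : Int) := by
      have h2 := PySem.Int.mod_natCast n.toNat 10
      have hcast : ((n.toNat : Nat) : Int) = n := by omega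
      rw [hcast] at h2; exact_mod_cast h2
    have hmlt : n.toNat % 10 < 10 := Nat.mod_lt _ (by omega)
    rw [pvLoopA, if_pos (by omega), hfd, hmd,
        pvTables_agree _ (by positivity) (by exact_mod_cast hmlt)]
    by_cases hsmall : n.toNat < 10
    · have hq : n.toNat / 10 = 0 := Nat.div_eq_of_lt hsmall
      have hm : n.toNat % 10 = n.toNat := Nat.mod_eq_of_lt hsmall
      rw [hq, hm, pvLoopA, if_neg (by simp), pvHorner, if_pos hsmall]
      ring
    · have hqpos : 0 < n.toNat / 10 := Nat.div_pos (by omega) (by omega)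
      have hqlt : n.toNat / 10 < n.toNat := Nat.div_lt_self (by omega) (by omega)
      have h1 : (0:Int) < ((n.toNat / 10 : Nat) : Int) := by exact_mod_cast hqpos
      have h2 : ((n.toNat / 10 : Nat) : Int).toNat ≤ k := by
        rw [Int.toNat_natCast]; omega
      rw [ih _ _ _ h1 h2, Int.toNat_natCast]
      conv_rhs => rw [pvHorner, if_neg hsmall]
      ring

-- ===== VERDICT (by name: the statement is the Claim_ definition above) =====
theorem replaceDigitWithPrime_spec : Claim_equal_replaceDigitWithPrime := by
  intro n _ hpre
  have hn : (0:Int) ≤ n := hpre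
  unfold Spec_replaceDigitWithPrime replaceDigitWithPrime replaceDigitWithPrime_alt
  have htc : PySem.Int.toChars n = Nat.toDigits 10 n.toNat := by
    simp [PySem.Int.toChars, show ¬ n < 0 by omega]
  by_cases h0 : n = 0
  · subst h0; decide
  · rw [if_neg (by simpa using h0), htc, pvFoldB_eq_horner,
        pvLoopA_eq_horner n.toNat n 0 1 (by omega) le_rfl]
    ring
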